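-- pv_equiv track=rewrite | github.com/sebastiangolec/advent-of-code | 2021/Day 4: Giant Squid.py | separateBoardLines
-- ===== SOURCE A (Python) =====
-- def separateBoardLines(input: list[str]) -> list[list[str]]:
--     boardLines = []
--     sublist = []
--
--     for line in input:
--         if line.isspace() == False:
--             sublist.append(line)
--
--         if len(sublist) == 5:
--             boardLines.append(sublist)
--             sublist = []
--
--     return boardLines
-- ===== SOURCE B (Python) =====
-- def separateBoardLines(input: list[str]) -> list[list[str]]:
--     kept = [line for line in input if not line.isspace()]
--     return [kept[i:i + 5] for i in range(0, (len(kept) // 5) * 5, 5)]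
-- ===== Notes on version B (the rewrite author's own statement) =====
-- stated objective: idiomatic
-- what changed: Replaces A's interleaved accumulate-and-flush loop with two separate passes: a filter comprehension keeping non-whitespace lines, then slicing the kept list into groups of 5 (truncated to a multiple of 5, so a trailing partial group is dropped exactly as in A).
import Mathlib
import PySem

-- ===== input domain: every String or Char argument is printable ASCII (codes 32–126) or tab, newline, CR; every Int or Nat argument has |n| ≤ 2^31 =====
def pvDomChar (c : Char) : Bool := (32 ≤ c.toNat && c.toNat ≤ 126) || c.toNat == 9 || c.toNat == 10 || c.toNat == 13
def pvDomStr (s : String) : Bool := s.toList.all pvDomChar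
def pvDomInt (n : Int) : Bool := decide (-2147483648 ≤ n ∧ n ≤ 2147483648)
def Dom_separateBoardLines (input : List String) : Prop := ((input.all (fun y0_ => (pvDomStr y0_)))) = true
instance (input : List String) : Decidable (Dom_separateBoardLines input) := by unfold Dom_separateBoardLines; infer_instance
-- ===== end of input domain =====

-- B replaces A's interleaved accumulate-and-flush loop by two passes: filter the
-- non-whitespace lines, then slice the kept list into groups of 5 (objective: idiomatic).

-- ===== PORT A =====
-- literal transliteration of A's loop: state = (boardLines, sublist)
def separateBoardLines (input : List String) : List (List String) :=
  (input.foldl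
    (fun (st : List (List String) × List String) line =>
      let sublist := if (PySem.Str.strIsspace line == false) then st.2 ++ [line] else st.2
      if sublist.length = 5 then (st.1 ++ [sublist], ([] : List String))
      else (st.1, sublist))
    (([] : List (List String)), ([] : List String))).1

-- ===== PORT B =====
def separateBoardLines_alt (input : List String) : List (List String) :=
  let kept := input.filter (fun line => !PySem.Str.strIsspace line)
  (PySem.List.pyRange 0 ((PySem.Int.floordiv (PySem.List.len kept) 5) * 5) 5).map
    (fun i => PySem.List.slice kept (some i) (some (i + 5)))

-- ===== PRECONDITION & SPEC =====
def Spec_separateBoardLines (input : List String) (out : List (List String)) : Prop := out = separateBoardLines_alt input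
instance (input : List String) (out : List (List String)) : Decidable (Spec_separateBoardLines input out) := by unfold Spec_separateBoardLines; infer_instance

-- ===== CLAIM (what is proved, stated in full; the proofs are below) =====
def Claim_equal_separateBoardLines : Prop := ∀ (input : List String), Dom_separateBoardLines input → Spec_separateBoardLines input (separateBoardLines input)

-- ===== LEMMAS AND PROOFS =====

-- A's loop body, named for the proofs
def stepA (st : List (List String) × List String) (line : String) :
    List (List String) × List String :=
  let sublist := if (PySem.Str.strIsspace line == false) then st.2 ++ [line] else st.2
  if sublist.length = 5 then (st.1 ++ [sublist], ([] : List String))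
  else (st.1, sublist)

theorem stepA_space {line : String} (st : List (List String) × List String)
    (hs : PySem.Str.strIsspace line = true) (h : st.2.length < 5) :
    stepA st line = st := by
  have hs' : PySem.Chars.strIsspace line.toList = true := by
    rw [← PySem.Str.strIsspace_eq]; exact hs
  simp [stepA, hs', Nat.ne_of_lt h]

theorem stepA_keep {line : String} (st : List (List String) × List String)
    (hs : ¬ PySem.Str.strIsspace line = true) :
    stepA st line =
      if (st.2 ++ [line]).length = 5 then (st.1 ++ [st.2 ++ [line]], ([] : List String))
      else (st.1, st.2 ++ [line]) := by
  have hs' : PySem.Chars.strIsspace line.toList = false := by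
    rw [← PySem.Str.strIsspace_eq]; exact Bool.eq_false_iff.mpr hs
  simp [stepA, hs']

-- chunks of 5, dropping a trailing partial chunk: the common characterisation
def chunk5 (l : List String) : List (List String)  :=
  if 5 ≤ l.length then l.take 5 :: chunk5 (l.drop 5) else []
termination_by l.length
decreasing_by simp; omega

theorem chunk5_of_lt {l : List String} (h : l.length < 5) : chunk5 l = [] := by
  rw [chunk5]; simp [Nat.not_le.mpr h]

theorem chunk5_append5 (s t : List String) (hs : s.length = 5) :
    chunk5 (s ++ t) = s :: chunk5 t := by
  rw [chunk5]
  simp [hs]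

-- loop invariant for A's fold
theorem foldA_invariant (input : List String) :
    ∀ (acc : List (List String)) (sub : List String), sub.length < 5 →
    (input.foldl stepA (acc, sub)).1
      = acc ++ chunk5 (sub ++ input.filter (fun line => !PySem.Str.strIsspace line)) := by
  induction input with
  | nil => intro acc sub h; simp [chunk5_of_lt h]
  | cons line rest ih =>
    intro acc sub h
    rw [List.foldl_cons]
    by_cases hs : PySem.Str.strIsspace line = true
    · rw [stepA_space (acc, sub) hs h, ih acc sub h,
        List.filter_cons_of_neg (by simp [PySem.Str.strIsspace_eq] at hs ⊢; simp [hs])]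
    · rw [stepA_keep (acc, sub) hs,
        List.filter_cons_of_pos (by simp [PySem.Str.strIsspace_eq] at hs ⊢; simp [hs]),
        List.append_cons sub line (List.filter (fun line => !PySem.Str.strIsspace line) rest)]
      by_cases h5 : (sub ++ [line]).length = 5
      · rw [if_pos h5, ih (acc ++ [sub ++ [line]]) [] (by simp),
          chunk5_append5 _ _ h5]
        simp
      · rw [if_neg h5, ih acc (sub ++ [line]) (by simp at h5 ⊢; omega),
          List.append_assoc]

theorem A_eq_chunk5 (input : List String) :
    separateBoardLines input
      = chunk5 (input.filter (fun line => !PySem.Str.strIsspace line)) := by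
  have : separateBoardLines input = (input.foldl stepA ([], [])).1 := rfl
  rw [this]
  simpa using foldA_invariant input [] [] (by simp)

-- B over the kept list, reduced to a Nat-indexed map
theorem chunk5_eq_range (kept : List String) :
    chunk5 kept
      = (List.range (kept.length / 5)).map (fun k => (kept.drop (5 * k)).take 5) := by
  by_cases h : 5 ≤ kept.length
  · rw [chunk5, if_pos h]
    have hq : kept.length / 5 = (kept.drop 5).length / 5 + 1 := by
      simp; omega
    rw [hq, List.range_succ_eq_map, List.map_cons, List.map_map,
      chunk5_eq_range (kept.drop 5)]
    simp only [Nat.mul_zero, List.drop_zero]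
    congr 1
    apply List.map_congr_left
    intro k _
    simp [Nat.succ_eq_add_one, List.drop_drop]
    ring_nf
  · rw [chunk5_of_lt (by omega)]
    have : kept.length / 5 = 0 := by omega
    simp [this]
termination_by kept.length
decreasing_by simp; omega

theorem floordiv_natCast5 (n : ℕ) : PySem.Int.floordiv (n : ℤ) 5 = ((n / 5 : ℕ) : ℤ) := by
  rw [PySem.Int.floordiv, Int.fdiv_eq_ediv]
  omega

theorem pyRange_mul5 (q : ℕ) :
    PySem.List.pyRange 0 ((q : ℤ) * 5) 5
      = (List.range q).map (fun k => ((5 * k : ℕ) : ℤ)) := by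
  rw [PySem.List.pyRange_of_pos 0 ((q : ℤ) * 5) (by norm_num)]
  by_cases hq : q = 0
  · simp [hq]
  · rw [if_pos (by omega : (0:ℤ) < (q:ℤ) * 5)]
    rw [(by omega : (((q:ℤ) * 5 - 0 + 5 - 1) / 5).toNat = q)]
    apply List.map_congr_left
    intro k _
    omega

theorem B_eq_chunk5 (input : List String) :
    separateBoardLines_alt input
      = chunk5 (input.filter (fun line => !PySem.Str.strIsspace line)) := by
  simp only [separateBoardLines_alt]
  set kept := input.filter (fun line => !PySem.Str.strIsspace line) with hk
  rw [(by simp [PySem.List.len] : PySem.List.len kept = ((kept.length : ℕ) : ℤ)),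
    floordiv_natCast5, pyRange_mul5, chunk5_eq_range, List.map_map]
  apply List.map_congr_left
  intro k _
  have := PySem.List.slice_natCast_add kept (5 * k) 5
  simpa using this

-- ===== VERDICT (by name: the statement is the Claim_ definition above) =====
theorem separateBoardLines_spec : Claim_equal_separateBoardLines := by
  intro input _
  unfold Spec_separateBoardLines
  rw [A_eq_chunk5, B_eq_chunk5]
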